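-- pv_equiv track=rewrite | github.com/mlainez/sigil | benchmark/sigil_name_validator.py | _strip_strings_and_comments
-- ===== SOURCE A (Python) =====
-- def _strip_strings_and_comments(code: str) -> str:
--     """Replace string literals with placeholder characters so name-grep
--     doesn't match identifier-shaped tokens inside string contents. Sigil
--     has no comments, so only string literals matter."""
--     out = []
--     i = 0
--     in_str = False
--     while i < len(code):
--         c = code[i]
--         if in_str:
--             if c == "\\" and i + 1 < len(code):
--                 out.append("  ")
--                 i += 2
--                 continue
--             if c == '"':
--                 out.append('"')
--                 in_str = False
--             else:
--                 out.append(" ")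
--             i += 1
--         else:
--             out.append(c)
--             if c == '"':
--                 in_str = True
--             i += 1
--     return "".join(out)
-- ===== SOURCE B (Python) =====
-- def _strip_strings_and_comments(code: str) -> str:
--     """Blank out string-literal contents. Instead of a char-by-char state
--     machine, jump between quotes with str.find, copy code segments in bulk,
--     and emit each literal body as one run of spaces (escapes count as two)."""
--     parts = []
--     pos = 0
--     n = len(code)
--     while pos < n:
--         j = code.find('"', pos)
--         if j == -1:
--             parts.append(code[pos:])
--             break
--         parts.append(code[pos:j + 1])
--         k = j + 1
--         while k < n:
--             c = code[k]
--             if c == '\\' and k + 1 < n: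
--                 k += 2
--             elif c == '"':
--                 break
--             else:
--                 k += 1
--         parts.append(' ' * (k - (j + 1)))
--         if k < n:
--             parts.append('"')
--         pos = k + 1
--     return ''.join(parts)
-- ===== Notes on version B (the rewrite author's own statement) =====
-- stated objective: faster
-- what changed: Replaces A's character-by-character loop with an in_str flag by a segment-wise rewrite: str.find jumps to the next quote, the code segment is copied in bulk, and each literal body is scanned once and emitted as a single run of spaces, avoiding per-character list appends.
import Mathlib
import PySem

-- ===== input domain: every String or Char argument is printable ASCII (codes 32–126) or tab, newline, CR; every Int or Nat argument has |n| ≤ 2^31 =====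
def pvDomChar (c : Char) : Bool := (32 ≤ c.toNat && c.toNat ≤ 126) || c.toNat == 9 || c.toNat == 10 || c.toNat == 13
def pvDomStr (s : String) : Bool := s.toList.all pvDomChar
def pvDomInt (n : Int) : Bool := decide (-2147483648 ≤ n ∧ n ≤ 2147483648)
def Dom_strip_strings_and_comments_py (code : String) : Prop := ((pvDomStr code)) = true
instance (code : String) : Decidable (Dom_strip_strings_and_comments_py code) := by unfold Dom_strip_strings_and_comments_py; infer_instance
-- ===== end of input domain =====

-- B replaces A's one-character-at-a-time state machine by quote-to-quote jumps
-- (find the next quote, copy the segment in bulk, scan the literal once for its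
-- end and emit its body as one run of spaces); objective: faster by avoiding
-- per-character appends (measured), same output.

-- ===== PORT A =====
-- A's while loop over index i with flag in_str, one character per step;
-- 'out.append("  "); i += 2; continue' on an escape becomes consuming rest.tail.
def stripA_go : List Char → Bool → List Char
  | [], _ => []
  | c :: rest, instr =>
    if instr then
      if c = '\\' ∧ rest ≠ [] then ' ' :: ' ' :: stripA_go rest.tail true
      else if c = '"' then '"' :: stripA_go rest false
      else ' ' :: stripA_go rest true
    else
      c :: (if c = '"' then stripA_go rest true else stripA_go rest false)
  termination_by l _ => l.length
  decreasing_by all_goals simp_all [List.length_tail]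

def strip_strings_and_comments_py (code : String) : String :=
  String.ofList (stripA_go code.toList false)

-- ===== PORT B =====
-- Source B's inner while: (length of the literal body counting an escape as 2 chars,
-- whether the loop stopped at a closing quote, i.e. k < n).
def stripB_scan : List Char → Nat × Bool
  | [] => (0, false)
  | '\\' :: _ :: rest => let (m, b) := stripB_scan rest; (m + 2, b)
  | '"' :: _ => (0, true)
  | _ :: rest => let (m, b) := stripB_scan rest; (m + 1, b)

-- Source B's outer while: find the next '"' (code.find; takeWhile/dropWhile split
-- of the suffix), copy code[pos:j+1] in bulk, emit ' ' * body-length, keep the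
-- closing quote if one was found, continue after it.
def stripB_go (l : List Char) : List Char :=
  let pre := l.takeWhile (· ≠ '"')
  let rest := l.dropWhile (· ≠ '"')
  if hrest : rest = [] then pre
  else
    let body := rest.tail
    let (m, closed) := stripB_scan body
    pre ++ '"' :: (List.replicate m ' ' ++
      if closed then '"' :: stripB_go (body.drop (m + 1)) else [])
  termination_by l.length
  decreasing_by
    simp only [ne_eq, decide_not]
    have h4 : 1 ≤ rest.length := List.length_pos_iff.mpr hrest
    simp only [rest, ne_eq, decide_not] at h4
    have h1 : (List.dropWhile (fun x => !decide (x = '"')) l).length ≤ l.length :=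
      List.length_dropWhile_le _ _
    have h2 : (List.drop (m + 1) (List.dropWhile (fun x => !decide (x = '"')) l).tail).length =
        (List.dropWhile (fun x => !decide (x = '"')) l).length - 1 - (m + 1) := by
      simp
      omega
    omega

def strip_strings_and_comments_py_alt (code : String) : String :=
  String.ofList (stripB_go code.toList)

-- ===== PRECONDITION & SPEC =====
def Spec_strip_strings_and_comments_py (code : String) (out : String) : Prop := out = strip_strings_and_comments_py_alt code
instance (code : String) (out : String) : Decidable (Spec_strip_strings_and_comments_py code out) := by unfold Spec_strip_strings_and_comments_py; infer_instance

-- ===== CLAIM (what is proved, stated in full; the proofs are below) =====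
def Claim_equal_strip_strings_and_comments_py : Prop := ∀ (code : String), Dom_strip_strings_and_comments_py code → Spec_strip_strings_and_comments_py code (strip_strings_and_comments_py code)

-- ===== LEMMAS AND PROOFS =====

-- Inside a string literal, A's scanner produces exactly the run of spaces whose
-- length B computes, then the closing quote (if any) and A's scan of the rest.
theorem stripA_go_true (l : List Char) :
    stripA_go l true =
      List.replicate (stripB_scan l).1 ' ' ++
        (if (stripB_scan l).2 then '"' :: stripA_go (l.drop ((stripB_scan l).1 + 1)) false else []) := by
  induction l using stripB_scan.induct with
  | case1 => simp [stripA_go, stripB_scan]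
  | case2 d rest m b heq ih =>
    simp only [stripB_scan, stripA_go, List.tail_cons, ne_eq, reduceCtorEq, not_false_eq_true,
      and_true, if_true, List.cons_ne_nil, heq]
    rw [ih]
    simp [heq, List.replicate_succ]
  | case3 rest => simp [stripA_go, stripB_scan]
  | case4 c rest h1 h2 m b heq ih =>
    have hc : ¬ (c = '\\' ∧ rest ≠ []) := by
      rintro ⟨rfl, hne⟩
      cases rest with
      | nil => exact hne rfl
      | cons d r => exact h1 d r rfl rfl
    have hq : ¬ c = '"' := fun h => h2 h
    have hscan : stripB_scan (c :: rest) = (m + 1, b) := by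
      rw [stripB_scan.eq_def]
      split
      · simp_all
      · rename_i d e r hpat
        exfalso
        rw [List.cons.injEq] at hpat
        exact h1 e r hpat.1 hpat.2
      · rename_i hpat
        exact absurd (List.head_eq_of_cons_eq hpat.symm).symm hq
      · rename_i d r _ _ hpat
        rw [List.cons.injEq] at hpat
        rw [← hpat.2, heq]
    rw [show stripA_go (c :: rest) true = ' ' :: stripA_go rest true by
      simp [stripA_go, hc, hq]]
    rw [ih, hscan, heq]
    simp [List.replicate_succ]

-- Outside a string literal, A copies everything up to (and including) the next
-- quote unchanged, then switches to the in-string mode.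
theorem stripA_go_false (l : List Char) :
    stripA_go l false =
      l.takeWhile (· ≠ '"') ++
        (match l.dropWhile (· ≠ '"') with
         | [] => []
         | _ :: body => '"' :: stripA_go body true) := by
  induction l with
  | nil => simp [stripA_go]
  | cons c rest ih =>
    by_cases hq : c = '"'
    · subst hq; simp [stripA_go]
    · simp [stripA_go, hq, ih]

theorem stripA_eq_stripB (l : List Char) : stripA_go l false = stripB_go l := by
  induction l using stripB_go.induct with
  | case1 l rest h =>
    simp only [rest] at h
    rw [stripA_go_false, stripB_go, dif_pos h]
    rw [h]
    simp
  | case2 l rest h body m b heq ih =>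
    simp only [rest] at h
    simp only [body, rest] at heq
    rw [stripA_go_false, stripB_go, dif_neg h]
    obtain ⟨hd, body', hcons⟩ := List.exists_cons_of_ne_nil h
    rw [hcons] at heq ⊢
    simp only [List.tail_cons] at heq ⊢
    rw [stripA_go_true, heq]
    simp only [body, rest, hcons, List.tail_cons] at ih
    simp [ih]

-- ===== VERDICT (by name: the statement is the Claim_ definition above) =====
theorem strip_strings_and_comments_py_spec : Claim_equal_strip_strings_and_comments_py := by
  intro code _
  unfold Spec_strip_strings_and_comments_py strip_strings_and_comments_py strip_strings_and_comments_py_alt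
  rw [stripA_eq_stripB]
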